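-- pv_equiv track=rewrite | github.com/GiorgiMatcharashvili/JWT-Clone | base64_clone/main.py | split_in_bits
-- ===== SOURCE A (Python) =====
-- def split_in_bits(bits):
--     split_amount = 6
--
--     splited_bits = []
--     for i in range(0, len(bits), split_amount):
--         splited_bit = bits[i:i + split_amount]
--         for _ in range(6 - len(splited_bit)):
--             splited_bit += '0'
--
--         splited_bits.append(splited_bit)
--     return splited_bits
-- ===== SOURCE B (Python) =====
-- def split_in_bits(bits):
--     # Single left-to-right pass over the characters with an accumulator:
--     # grow the current chunk one character at a time, flush it when it
--     # reaches 6 characters, and zero-pad whatever is left at the end.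
--     chunks = []
--     cur = ''
--     for ch in bits:
--         cur += ch
--         if len(cur) == 6:
--             chunks.append(cur)
--             cur = ''
--     if cur:
--         chunks.append(cur + '0' * (6 - len(cur)))
--     return chunks
-- ===== Notes on version B (the rewrite author's own statement) =====
-- stated objective: alternative
-- what changed: B replaces A's index-arithmetic traversal (range(0, len, 6) with slicing and an inner per-chunk padding loop) by a single character-by-character pass with an accumulator that flushes each chunk when it reaches 6 characters and pads only the final remainder.
import Mathlib
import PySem

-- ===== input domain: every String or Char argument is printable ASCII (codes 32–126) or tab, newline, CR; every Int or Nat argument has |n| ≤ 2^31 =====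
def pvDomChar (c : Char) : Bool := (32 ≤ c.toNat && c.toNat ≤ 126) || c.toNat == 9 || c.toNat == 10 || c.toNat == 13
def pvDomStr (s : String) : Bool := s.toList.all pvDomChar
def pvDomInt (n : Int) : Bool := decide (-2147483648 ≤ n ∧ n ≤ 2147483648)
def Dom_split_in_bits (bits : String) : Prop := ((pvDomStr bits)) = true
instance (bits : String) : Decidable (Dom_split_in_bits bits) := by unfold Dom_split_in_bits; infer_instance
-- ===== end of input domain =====

-- B replaces A's index/slice traversal by a single character-by-character pass with an
-- accumulator that flushes each 6-character chunk and zero-pads only the final remainder.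


-- ===== PORT A =====
def split_in_bits (bits : String) : List String :=
  let split_amount : Int := 6
  (PySem.List.pyRange 0 (PySem.Str.len bits) split_amount).foldl
    (fun splited_bits i =>
      let splited_bit := PySem.List.slice bits.toList (some i) (some (i + split_amount))
      let splited_bit := (PySem.List.pyRange 0 (6 - (splited_bit.length : Int)) 1).foldl
        (fun s _ => s ++ ['0']) splited_bit
      splited_bits ++ [String.ofList splited_bit]) []

-- ===== PORT B =====
def split_in_bits_alt (bits : String) : List String :=
  let st := bits.toList.foldl
    (fun (st : List String × List Char) ch =>
      let cur := st.2 ++ [ch]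
      if cur.length = 6 then (st.1 ++ [String.ofList cur], []) else (st.1, cur))
    ([], [])
  if st.2 = [] then st.1
  else st.1 ++ [String.ofList (st.2 ++ List.replicate (6 - st.2.length) '0')]

-- ===== PRECONDITION & SPEC =====
def Spec_split_in_bits (bits : String) (out : List String) : Prop := out = split_in_bits_alt bits
instance (bits : String) (out : List String) : Decidable (Spec_split_in_bits bits out) := by unfold Spec_split_in_bits; infer_instance

-- ===== CLAIM (what is proved, stated in full; the proofs are below) =====
def Claim_equal_split_in_bits : Prop := ∀ (bits : String), Dom_split_in_bits bits → Spec_split_in_bits bits (split_in_bits bits)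

-- ===== LEMMAS AND PROOFS =====

-- a chunk padded to 6 characters with '0'
def pad6 (l : List Char) : List Char := l ++ List.replicate (6 - l.length) '0'

-- common recursive characterisation: take-6/drop-6 chunking, padding each chunk
def chunk6 : List Char → List String
  | [] => []
  | c :: rest =>
      String.ofList (pad6 (List.take 6 (c :: rest))) :: chunk6 (List.drop 6 (c :: rest))
termination_by cs => cs.length
decreasing_by simp only [List.length_drop, List.length_cons]; omega

theorem chunk6_ne (cs : List Char) (h : cs ≠ []) :
    chunk6 cs = String.ofList (pad6 (List.take 6 cs)) :: chunk6 (List.drop 6 cs) := by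
  cases cs with
  | nil => exact absurd rfl h
  | cons c rest => rw [chunk6]

-- B's fold-and-flush pass computes the chunking, for any in-progress chunk of < 6 chars
theorem B_fold (cs : List Char) (acc : List String) (cur : List Char) (h : cur.length < 6) :
    (let st := cs.foldl
        (fun (st : List String × List Char) ch =>
          let cur := st.2 ++ [ch]
          if cur.length = 6 then (st.1 ++ [String.ofList cur], []) else (st.1, cur))
        (acc, cur)
     if st.2 = [] then st.1
     else st.1 ++ [String.ofList (st.2 ++ List.replicate (6 - st.2.length) '0')])
    = acc ++ chunk6 (cur ++ cs) := by
  induction cs generalizing acc cur with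
  | nil =>
    simp only [List.foldl_nil]
    rw [List.append_nil]
    by_cases hc : cur = []
    · subst hc; rw [if_pos rfl, chunk6, List.append_nil]
    · rw [chunk6_ne cur hc]
      have ht : List.take 6 cur = cur := List.take_of_length_le (by omega)
      have hd : List.drop 6 cur = [] := List.drop_of_length_le (by omega)
      rw [ht, hd, chunk6]
      simp [hc, pad6]
  | cons c cs' ih =>
    simp only [List.foldl_cons]
    by_cases h6 : (cur ++ [c]).length = 6
    · simp only [h6, reduceIte]
      rw [ih (acc ++ [String.ofList (cur ++ [c])]) [] (by norm_num)]
      have hne : (cur ++ [c]) ++ cs' ≠ [] := by simp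
      rw [show cur ++ c :: cs' = (cur ++ [c]) ++ cs' by simp]
      rw [chunk6_ne _ hne]
      have ht : List.take 6 ((cur ++ [c]) ++ cs') = cur ++ [c] := by
        rw [List.take_append_of_le_length (by omega)]
        exact List.take_of_length_le (by omega)
      have hd : List.drop 6 ((cur ++ [c]) ++ cs') = cs' := by
        rw [List.drop_append_of_le_length (by omega)]
        simp [List.drop_of_length_le (le_of_eq h6)]
      rw [ht, hd]
      simp [pad6, h6]
    · simp only [h6, reduceIte]
      rw [ih acc (cur ++ [c]) (by simp at h6 ⊢; omega)]
      rw [show (cur ++ [c]) ++ cs' = cur ++ c :: cs' by simp]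

theorem B_eq_chunk (bits : String) : split_in_bits_alt bits = chunk6 bits.toList := by
  unfold split_in_bits_alt
  have := B_fold bits.toList [] [] (by norm_num)
  simpa using this

-- A's range-of-offsets map computes the chunking
theorem mapA (cs : List Char) :
    (List.range ((cs.length + 5) / 6)).map
      (fun k => String.ofList (pad6 (List.take 6 (List.drop (6 * k) cs)))) = chunk6 cs := by
  cases hcs : cs with
  | nil => rw [chunk6]; simp
  | cons c rest =>
    rw [← hcs]
    have hne : cs ≠ [] := by rw [hcs]; simp
    have hlen : 1 ≤ cs.length := by rw [hcs]; simp
    have hm : (cs.length + 5) / 6 = ((List.drop 6 cs).length + 5) / 6 + 1 := by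
      rw [List.length_drop]; omega
    rw [hm, List.range_succ_eq_map, List.map_cons, List.map_map, chunk6_ne cs hne]
    have hIH := mapA (List.drop 6 cs)
    congr 1
    rw [← hIH]
    refine List.map_congr_left fun k _ => ?_
    simp only [Function.comp_apply]
    rw [show 6 * (k + 1) = 6 * k + 6 by ring, ← List.drop_drop, List.drop_drop, List.drop_drop,
        Nat.add_comm (6 * k) 6]
termination_by cs.length
decreasing_by rw [hcs]; simp only [List.length_drop, List.length_cons]; omega

theorem A_eq_chunk (bits : String) : split_in_bits bits = chunk6 bits.toList := by
  unfold split_in_bits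
  simp only [PySem.Str.len_eq, PySem.List.foldl_append_singleton_eq_map, List.nil_append]
  rw [PySem.List.pyRange_of_pos 0 _ (by norm_num : (0:Int) < 6), List.map_map]
  set cs := bits.toList with hcs
  have hcount : (if (0:Int) < (cs.length : Int) then
      (((cs.length : Int) - 0 + 6 - 1) / 6).toNat else 0) = (cs.length + 5) / 6 := by
    split_ifs with h
    · rw [show ((cs.length : Int) - 0 + 6 - 1) = ((cs.length + 5 : Nat) : Int) by push_cast; ring]
      norm_cast
    · have : cs.length = 0 := by omega
      simp [this]
  rw [hcount, ← mapA cs]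
  refine List.map_congr_left fun k _ => ?_
  simp only [Function.comp_apply]
  rw [show (0:Int) + 6 * (k : Int) = ((6 * k : Nat) : Int) by push_cast; ring]
  rw [show ((6 * k : Nat) : Int) + 6 = ((6 * k : Nat) : Int) + ((6 : Nat) : Int) from rfl,
      PySem.List.slice_natCast_add]
  congr 1
  set b := List.take 6 (List.drop (6 * k) cs) with hb
  have hL : b.length ≤ 6 := by rw [hb]; simp
  rw [List.map_const', PySem.List.length_pyRange_one]
  unfold pad6
  congr 2
  omega

-- ===== VERDICT (by name: the statement is the Claim_ definition above) =====
theorem split_in_bits_spec : Claim_equal_split_in_bits := by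
  intro bits _
  unfold Spec_split_in_bits
  rw [A_eq_chunk, B_eq_chunk]
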